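-- pv_equiv track=rewrite | github.com/nick-esqueda/leetcode-practice | 0-STRUCTY/exhaustive_recursion/substitute_synonyms.py | substitute_synonyms
-- ===== SOURCE A (Python) =====
-- def substitute_synonyms(sentence, synonyms):
--   """
--   declare result var = [] (array of strings)
--   declare options var = []
--   strip out the first "word" (a word stops at a space)
--   if the first word is in the map:
--     push each syn to the options var
--   else it's not in the map:
--     add that word to options var
--
--   for each option: (can be optimized with memoization)
--     recurse with the rest of the sentence (minus first word)
--     add the syn to the beginning of each of those sentences
--     push those modified sentences to the result var
--
--   return result
--   """
--   if len(sentence) == 0: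
--     return [""]
--
--   result = []
--   options = []
--
--   words = sentence.split()
--   first_word = words[0]
--   remainder = " ".join(words[1:])
--
--   if first_word in synonyms:
--     for syn in synonyms[first_word]:
--       options.append(syn)
--   else:
--     options.append(first_word)
--
--   for option in options:
--     sentences = substitute_synonyms(remainder, synonyms)
--     for sentence in sentences:
--       if sentence == "":
--         result.append(option)
--       else:
--         result.append(option + ' ' + sentence)
--
--   return result
-- ===== SOURCE B (Python) =====
-- def substitute_synonyms(sentence, synonyms):
--     # DP over sentence positions: build results for each suffix once, back to front,
--     # instead of re-recursing on the remainder for every option.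
--     results = [""]
--     for word in reversed(sentence.split()):
--         options = synonyms.get(word, [word])
--         results = [o if s == "" else o + " " + s for o in options for s in results]
--     return results
-- ===== Notes on version B (the rewrite author's own statement) =====
-- stated objective: alternative
-- what changed: Replaces A's recursion (which re-recurses on the remainder once per synonym option) with a single back-to-front fold over the word list that builds each suffix's sentence list exactly once.
import Mathlib
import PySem

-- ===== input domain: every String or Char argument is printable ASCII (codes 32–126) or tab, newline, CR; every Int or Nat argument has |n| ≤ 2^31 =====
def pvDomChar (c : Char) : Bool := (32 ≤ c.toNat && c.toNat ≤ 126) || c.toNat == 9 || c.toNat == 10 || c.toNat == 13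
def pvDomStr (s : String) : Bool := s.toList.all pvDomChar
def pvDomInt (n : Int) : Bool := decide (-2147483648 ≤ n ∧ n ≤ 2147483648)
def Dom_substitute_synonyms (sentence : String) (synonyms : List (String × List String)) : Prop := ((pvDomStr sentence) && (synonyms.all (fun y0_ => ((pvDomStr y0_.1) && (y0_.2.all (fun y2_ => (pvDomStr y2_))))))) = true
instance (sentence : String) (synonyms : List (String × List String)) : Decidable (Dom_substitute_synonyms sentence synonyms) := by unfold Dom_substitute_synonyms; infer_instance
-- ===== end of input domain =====

-- B replaces A's per-option re-recursion over the remainder by a single back-to-front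
-- fold over the word positions (each suffix's sentence list is built once).


-- shared tiny helper: dict lookup of a word's options ({} first-match lookup; default [word])
def pvOptions (synonyms : List (String × List String)) (w : List Char) : List (List Char) :=
  match synonyms.find? (fun p => p.1.toList == w) with
  | some p => p.2.map String.toList
  | none => [w]

-- ===== PORT A =====
-- A's recursion, on char lists; the fuel argument only makes the recursion structural
-- (it is always sufficient: the remainder has strictly fewer words).
def pvGoA (fuel : Nat) (s : List Char) (synonyms : List (String × List String)) : List (List Char) :=
  match fuel with
  | 0 => []
  | fuel + 1 =>
    if s = [] then [[]]
    else
      match PySem.Chars.split₀ s with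
      | [] => []   -- Python: words[0] raises IndexError here; excluded by Pre_
      | first_word :: restWords =>
        let remainder := PySem.Chars.join [' '] restWords
        let options : List (List Char) :=
          match synonyms.find? (fun p => p.1.toList == first_word) with
          | some p => p.2.foldl (fun opts syn => opts ++ [syn.toList]) []
          | none => [first_word]
        options.foldl (fun result option =>
          let sentences := pvGoA fuel remainder synonyms
          sentences.foldl (fun result sentence =>
            if sentence = [] then result ++ [option]
            else result ++ [option ++ ' ' :: sentence]) result) []

def substitute_synonyms (sentence : String) (synonyms : List (String × List String)) : List String :=
  (pvGoA (sentence.toList.length + 1) sentence.toList synonyms).map String.ofList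

-- ===== PORT B =====
def substitute_synonyms_alt (sentence : String) (synonyms : List (String × List String)) : List String :=
  (((PySem.Chars.split₀ sentence.toList).reverse).foldl
      (fun results word =>
        (pvOptions synonyms word).flatMap
          (fun o => results.map (fun s => if s = [] then o else o ++ ' ' :: s)))
      [[]]).map String.ofList

-- ===== PRECONDITION & SPEC =====
-- Pre_ excludes exactly the non-empty all-whitespace sentences, on which A's words[0] raises IndexError.
def Pre_substitute_synonyms (sentence : String) (synonyms : List (String × List String)) : Prop :=
  sentence = "" ∨ PySem.Str.split₀ sentence ≠ []
instance (sentence : String) (synonyms : List (String × List String)) : Decidable (Pre_substitute_synonyms sentence synonyms) := by unfold Pre_substitute_synonyms; infer_instance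
def pvWitness_substitute_synonyms : String × (List (String × List String)) := ("a b", [("a", ["x", "y"])])

def Spec_substitute_synonyms (sentence : String) (synonyms : List (String × List String)) (out : List String) : Prop := out = substitute_synonyms_alt sentence synonyms
instance (sentence : String) (synonyms : List (String × List String)) (out : List String) : Decidable (Spec_substitute_synonyms sentence synonyms out) := by unfold Spec_substitute_synonyms; infer_instance

-- ===== CLAIM (what is proved, stated in full; the proofs are below) =====
def Claim_equal_substitute_synonyms : Prop := ∀ (sentence : String) (synonyms : List (String × List String)), Dom_substitute_synonyms sentence synonyms → Pre_substitute_synonyms sentence synonyms → Spec_substitute_synonyms sentence synonyms (substitute_synonyms sentence synonyms)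

-- ===== LEMMAS AND PROOFS =====

-- a token is clean: non-empty and whitespace-free
def pvClean (ws : List (List Char)) : Prop :=
  ∀ w ∈ ws, w ≠ [] ∧ ∀ c ∈ w, PySem.Chars.isspace c = false

-- B's fold, written as a foldr over the word list (the core both ports reduce to)
def pvF (synonyms : List (String × List String)) (ws : List (List Char)) : List (List Char) :=
  ws.foldr
    (fun word results =>
      (pvOptions synonyms word).flatMap
        (fun o => results.map (fun s => if s = [] then o else o ++ ' ' :: s)))
    [[]]

theorem pvAlt_eq_F (sentence : String) (synonyms : List (String × List String)) :
    substitute_synonyms_alt sentence synonyms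
      = (pvF synonyms (PySem.Chars.split₀ sentence.toList)).map String.ofList := by
  simp [substitute_synonyms_alt, pvF, List.foldl_reverse]

-- split₀ produces clean tokens
theorem pvGo_clean (s cur : List Char) (acc : List (List Char))
    (hcur : ∀ c ∈ cur, PySem.Chars.isspace c = false) (hacc : pvClean acc) :
    pvClean (PySem.Chars.split₀.go s cur acc) := by
  induction s generalizing cur acc with
  | nil =>
      simp only [PySem.Chars.split₀.go]
      by_cases h : cur = []
      · simp [h, pvClean]
        intro w hw; exact hacc w (by simpa using hw)
      · simp [List.isEmpty_iff, h]
        intro w hw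
        simp at hw
        rcases hw with hw2 | hw1
        · exact hacc w hw2
        · subst hw1
          refine ⟨by simpa using h, ?_⟩
          intro c hc; exact hcur c (by simpa using hc)
  | cons c rest ih =>
      simp only [PySem.Chars.split₀.go]
      by_cases hs : PySem.Chars.isspace c = true
      · simp only [hs, if_true]
        by_cases h : cur = []
        · simp [h]; exact ih [] acc (by simp) hacc
        · simp [List.isEmpty_iff, h]
          refine ih [] _ (by simp) ?_
          intro w hw
          rcases List.mem_cons.mp hw with hw1 | hw2
          · subst hw1
            refine ⟨by simpa using h, ?_⟩
            intro d hd; exact hcur d (by simpa using hd)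
          · exact hacc w hw2
      · simp only [Bool.not_eq_true] at hs
        simp only [hs, Bool.false_eq_true, if_false]
        refine ih (c :: cur) acc ?_ hacc
        intro d hd
        rcases List.mem_cons.mp hd with hd1 | hd2
        · subst hd1; exact hs
        · exact hcur d hd2

theorem pvSplit_clean (s : List Char) : pvClean (PySem.Chars.split₀ s) := by
  simpa [PySem.Chars.split₀] using pvGo_clean s [] [] (by simp) (by simp [pvClean])

-- go walks through a whitespace-free block unchanged
theorem pvGo_append (w : List Char) (hw : ∀ c ∈ w, PySem.Chars.isspace c = false) :
    ∀ (rest cur : List Char) (acc : List (List Char)),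
      PySem.Chars.split₀.go (w ++ rest) cur acc
        = PySem.Chars.split₀.go rest (w.reverse ++ cur) acc := by
  induction w with
  | nil => intro rest cur acc; simp
  | cons c w ih =>
      intro rest cur acc
      have hc : PySem.Chars.isspace c = false := hw c (by simp)
      simp only [List.cons_append, PySem.Chars.split₀.go, hc, Bool.false_eq_true, if_false]
      rw [ih (fun d hd => hw d (by simp [hd])) rest (c :: cur) acc]
      simp

-- splitting the space-join of clean tokens recovers the tokens
theorem pvGo_join (ws : List (List Char)) (hws : pvClean ws) (acc : List (List Char)) :
    PySem.Chars.split₀.go (PySem.Chars.join [' '] ws) [] acc = acc.reverse ++ ws := by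
  induction ws generalizing acc with
  | nil => simp [PySem.Chars.join_nil, PySem.Chars.split₀.go]
  | cons w rest ih =>
      have hw := hws w (by simp)
      cases rest with
      | nil =>
          rw [PySem.Chars.join_singleton]
          have h := pvGo_append w hw.2 [] [] acc
          rw [List.append_nil] at h
          rw [h]
          simp [PySem.Chars.split₀.go, hw.1]
      | cons w' rest' =>
          rw [PySem.Chars.join_cons_cons]
          rw [List.append_assoc, pvGo_append w hw.2 _ [] acc]
          have hsp : PySem.Chars.isspace ' ' = true := by decide
          simp only [List.append_nil, List.cons_append, List.nil_append,
            PySem.Chars.split₀.go, hsp, if_true]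
          have hwr : w.reverse.isEmpty = false := by
            simp [hw.1]
          simp only [hwr, Bool.false_eq_true, if_false, List.reverse_reverse]
          rw [ih (fun u hu => hws u (by simp [hu])) (w :: acc)]
          simp

theorem pvSplit_join (ws : List (List Char)) (hws : pvClean ws) :
    PySem.Chars.split₀ (PySem.Chars.join [' '] ws) = ws := by
  simpa [PySem.Chars.split₀] using pvGo_join ws hws []

theorem pvJoin_ne_nil (w : List Char) (ws : List (List Char)) (hw : w ≠ []) :
    PySem.Chars.join [' '] (w :: ws) ≠ [] := by
  cases ws with
  | nil => simpa [PySem.Chars.join_singleton] using hw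
  | cons w' rest => rw [PySem.Chars.join_cons_cons]; simp [hw]

-- split₀ produces at most |s| tokens (fuel sufficiency)
theorem pvGo_length (s cur : List Char) (acc : List (List Char)) :
    (PySem.Chars.split₀.go s cur acc).length
      ≤ acc.length + s.length + (if cur.isEmpty then 0 else 1) := by
  induction s generalizing cur acc with
  | nil =>
      simp only [PySem.Chars.split₀.go]
      by_cases h : cur.isEmpty
      · simp [h]
      · simp only [h, Bool.false_eq_true, if_false]
        simp
  | cons c rest ih =>
      simp only [PySem.Chars.split₀.go]
      by_cases hs : PySem.Chars.isspace c = true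
      · simp only [hs, if_true]
        by_cases h : cur.isEmpty
        · simp only [h, if_true]
          have := ih [] acc; simp at this ⊢; omega
        · simp only [h, Bool.false_eq_true, if_false]
          have := ih [] (cur.reverse :: acc); simp at this ⊢; omega
      · simp only [Bool.not_eq_true] at hs
        simp only [hs, Bool.false_eq_true, if_false]
        have := ih (c :: cur) acc; simp at this ⊢; split_ifs <;> omega

theorem pvSplit_length (s : List Char) :
    (PySem.Chars.split₀ s).length ≤ s.length := by
  simpa [PySem.Chars.split₀] using pvGo_length s [] []

-- A's option list equals B's
theorem pvOptions_eq (synonyms : List (String × List String)) (w : List Char) :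
    (match synonyms.find? (fun p => p.1.toList == w) with
      | some p => p.2.foldl (fun opts syn => opts ++ [syn.toList]) []
      | none => [w]) = pvOptions synonyms w := by
  unfold pvOptions
  cases synonyms.find? (fun p => p.1.toList == w) with
  | none => rfl
  | some p => simpa using PySem.List.foldl_append_singleton_eq_map String.toList p.2 []

-- A's double foldl over options × sentences is B's flatMap/map
theorem pvFoldl_flatMap (options sentences : List (List Char)) :
    options.foldl (fun result option =>
        sentences.foldl (fun result sentence =>
          if sentence = [] then result ++ [option]
          else result ++ [option ++ ' ' :: sentence]) result) []
      = options.flatMap (fun o => sentences.map (fun s => if s = [] then o else o ++ ' ' :: s)) := by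
  have hinner : ∀ (o : List Char) (res : List (List Char)),
      sentences.foldl (fun result t =>
          if t = [] then result ++ [o] else result ++ [o ++ ' ' :: t])
        res = res ++ sentences.map (fun s => if s = [] then o else o ++ ' ' :: s) := by
    intro o res
    have h : (fun (result : List (List Char)) t =>
        if t = [] then result ++ [o] else result ++ [o ++ ' ' :: t])
        = fun result t => result ++ [if t = [] then o else o ++ ' ' :: t] := by
      funext r t; split_ifs <;> rfl
    rw [h, PySem.List.foldl_append_singleton_eq_map]
  have h2 : (fun (result : List (List Char)) option =>
      sentences.foldl (fun result sentence =>
        if sentence = [] then result ++ [option]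
        else result ++ [option ++ ' ' :: sentence]) result)
      = fun res o => res ++ sentences.map (fun s => if s = [] then o else o ++ ' ' :: s) :=
    funext fun res => funext fun o => hinner o res
  rw [h2, PySem.List.foldl_append_eq_flatMap]
  simp

-- one unfolding of A at a non-empty sentence
theorem pvGoA_cons (fuel : Nat) (s : List Char) (synonyms : List (String × List String))
    (w : List Char) (rest : List (List Char))
    (hs : s ≠ []) (hsplit : PySem.Chars.split₀ s = w :: rest) :
    pvGoA (fuel + 1) s synonyms
      = (pvOptions synonyms w).flatMap
          (fun o => (pvGoA fuel (PySem.Chars.join [' '] rest) synonyms).map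
            (fun t => if t = [] then o else o ++ ' ' :: t)) := by
  conv_lhs => rw [pvGoA]
  simp only [hsplit, if_neg hs]
  rw [pvOptions_eq, pvFoldl_flatMap]

-- main induction: A with enough fuel on a join of clean tokens equals B's fold
theorem pvGoA_eq_F (ws : List (List Char)) (hws : pvClean ws) :
    ∀ (fuel : Nat) (synonyms : List (String × List String)), ws.length < fuel →
      pvGoA fuel (PySem.Chars.join [' '] ws) synonyms = pvF synonyms ws := by
  induction ws with
  | nil =>
      intro fuel synonyms hf
      cases fuel with
      | zero => omega
      | succ f => simp [PySem.Chars.join_nil, pvGoA, pvF]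
  | cons w rest ih =>
      intro fuel synonyms hf
      cases fuel with
      | zero => omega
      | succ f =>
          have hw := hws w (by simp)
          have hne := pvJoin_ne_nil w rest hw.1
          have hsplit := pvSplit_join (w :: rest) hws
          rw [pvGoA_cons f _ synonyms w rest hne hsplit]
          rw [ih (fun u hu => hws u (by simp [hu])) f synonyms (by simp at hf; omega)]
          rfl

-- ===== VERDICT (by name: the statement is the Claim_ definition above) =====
theorem substitute_synonyms_spec : Claim_equal_substitute_synonyms := by
  intro sentence synonyms _ hpre
  unfold Spec_substitute_synonyms
  rw [pvAlt_eq_F]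
  unfold substitute_synonyms
  by_cases hnil : sentence.toList = []
  · rw [hnil]
    have : PySem.Chars.split₀ ([] : List Char) = [] := by decide
    simp [this, pvGoA, pvF]
  · have hsp : PySem.Chars.split₀ sentence.toList ≠ [] := by
      rcases hpre with h | h
      · exact absurd (by simpa using congrArg String.toList h) hnil
      · simpa [PySem.Str.split₀] using h
    obtain ⟨w, rest, hsplit⟩ := List.exists_cons_of_ne_nil hsp
    have hclean := pvSplit_clean sentence.toList
    rw [hsplit] at hclean
    have hlen : rest.length < sentence.toList.length := by
      have h := pvSplit_length sentence.toList
      rw [hsplit] at h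
      simp only [List.length_cons] at h
      omega
    rw [pvGoA_cons _ _ _ w rest hnil hsplit]
    rw [pvGoA_eq_F rest (fun u hu => hclean u (by simp [hu])) _ synonyms hlen]
    rw [hsplit]
    rfl
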